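-- pv_equiv track=rewrite | github.com/omkawle77/academiq-v2 | backend/knowledge_base.py | resolve_strategies
-- ===== SOURCE A (Python) =====
-- SEMANTIC_NET_EDGES = [
--     ("low_gpa",           "tutoring",           "is_resolved_by"),
--     ("low_gpa",           "study_schedule",     "is_resolved_by"),
--     ("low_gpa",           "active_recall",      "is_resolved_by"),
--     ("low_gpa",           "peer_learning",      "is_resolved_by"),
--     ("poor_attendance",   "attendance_plan",    "is_resolved_by"),
--     ("poor_attendance",   "counseling",         "is_resolved_by"),
--     ("poor_attendance",   "wellness",           "is_resolved_by"),
--     ("weak_subjects",     "tutoring",           "is_resolved_by"),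
--     ("weak_subjects",     "spaced_repetition",  "is_resolved_by"),
--     ("weak_subjects",     "active_recall",      "is_resolved_by"),
--     ("low_study_hours",   "study_schedule",     "is_resolved_by"),
--     ("low_study_hours",   "goal_setting",       "is_resolved_by"),
--     ("no_extracurricular","extracurricular_join","is_resolved_by"),
--     ("critical",          "counseling",         "requires"),
--     ("below_average",     "goal_setting",       "requires"),
--     ("good",              "advanced_courses",   "should_consider"),
--     ("excellent",         "maintain_excellence","should_practice"),
--     ("excellent",         "advanced_courses",   "should_consider"),
-- ]
--
-- def resolve_strategies(problems, level):
--     strategies = set()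
--     for prob in problems:
--         for src,dst,rel in SEMANTIC_NET_EDGES:
--             if src==prob and rel=="is_resolved_by":
--                 strategies.add(dst)
--     for src,dst,rel in SEMANTIC_NET_EDGES:
--         if src==level and rel in ("requires","should_consider","should_practice"):
--             strategies.add(dst)
--     return list(strategies)
-- ===== SOURCE B (Python) =====
-- SEMANTIC_NET_EDGES = [
--     ("low_gpa",           "tutoring",           "is_resolved_by"),
--     ("low_gpa",           "study_schedule",     "is_resolved_by"),
--     ("low_gpa",           "active_recall",      "is_resolved_by"),
--     ("low_gpa",           "peer_learning",      "is_resolved_by"),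
--     ("poor_attendance",   "attendance_plan",    "is_resolved_by"),
--     ("poor_attendance",   "counseling",         "is_resolved_by"),
--     ("poor_attendance",   "wellness",           "is_resolved_by"),
--     ("weak_subjects",     "tutoring",           "is_resolved_by"),
--     ("weak_subjects",     "spaced_repetition",  "is_resolved_by"),
--     ("weak_subjects",     "active_recall",      "is_resolved_by"),
--     ("low_study_hours",   "study_schedule",     "is_resolved_by"),
--     ("low_study_hours",   "goal_setting",       "is_resolved_by"),
--     ("no_extracurricular","extracurricular_join","is_resolved_by"),
--     ("critical",          "counseling",         "requires"),
--     ("below_average",     "goal_setting",       "requires"),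
--     ("good",              "advanced_courses",   "should_consider"),
--     ("excellent",         "maintain_excellence","should_practice"),
--     ("excellent",         "advanced_courses",   "should_consider"),
-- ]
--
-- # Module-level indices precomputed once from the edge list.
-- RESOLVERS = {}
-- LEVEL_STRATEGIES = {}
-- for _src, _dst, _rel in SEMANTIC_NET_EDGES:
--     if _rel == "is_resolved_by":
--         RESOLVERS.setdefault(_src, set()).add(_dst)
--     elif _rel in ("requires", "should_consider", "should_practice"):
--         LEVEL_STRATEGIES.setdefault(_src, set()).add(_dst)
--
-- def resolve_strategies(problems, level):
--     strategies = set()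
--     for prob in problems:
--         strategies |= RESOLVERS.get(prob, set())
--     strategies |= LEVEL_STRATEGIES.get(level, set())
--     return list(strategies)
-- ===== Notes on version B (the rewrite author's own statement) =====
-- stated objective: faster
-- what changed: Replaces the per-problem inner scan over all 18 edges with two module-level dict indices (source -> set of strategies) built once, so the function body is just dict lookups and set unions.
import Mathlib
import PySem

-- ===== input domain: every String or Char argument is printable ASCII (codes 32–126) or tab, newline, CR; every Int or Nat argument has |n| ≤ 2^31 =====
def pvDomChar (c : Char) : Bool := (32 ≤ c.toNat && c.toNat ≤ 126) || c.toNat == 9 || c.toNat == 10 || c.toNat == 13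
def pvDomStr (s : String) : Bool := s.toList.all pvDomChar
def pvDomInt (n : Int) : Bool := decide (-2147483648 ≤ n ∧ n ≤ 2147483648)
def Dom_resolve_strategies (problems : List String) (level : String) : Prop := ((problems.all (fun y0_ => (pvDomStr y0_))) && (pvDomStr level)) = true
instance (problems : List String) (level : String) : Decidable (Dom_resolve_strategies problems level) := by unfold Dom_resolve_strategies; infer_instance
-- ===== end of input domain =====

-- B replaces A's per-problem scan over the whole edge list with two precomputed
-- source→strategies indices and set unions (alternative data structure; return value proved equal).

-- ===== PORT A =====
def pvEdges : List (String × String × String) := [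
    ("low_gpa",           "tutoring",           "is_resolved_by"),
    ("low_gpa",           "study_schedule",     "is_resolved_by"),
    ("low_gpa",           "active_recall",      "is_resolved_by"),
    ("low_gpa",           "peer_learning",      "is_resolved_by"),
    ("poor_attendance",   "attendance_plan",    "is_resolved_by"),
    ("poor_attendance",   "counseling",         "is_resolved_by"),
    ("poor_attendance",   "wellness",           "is_resolved_by"),
    ("weak_subjects",     "tutoring",           "is_resolved_by"),
    ("weak_subjects",     "spaced_repetition",  "is_resolved_by"),
    ("weak_subjects",     "active_recall",      "is_resolved_by"),
    ("low_study_hours",   "study_schedule",     "is_resolved_by"),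
    ("low_study_hours",   "goal_setting",       "is_resolved_by"),
    ("no_extracurricular","extracurricular_join","is_resolved_by"),
    ("critical",          "counseling",         "requires"),
    ("below_average",     "goal_setting",       "requires"),
    ("good",              "advanced_courses",   "should_consider"),
    ("excellent",         "maintain_excellence","should_practice"),
    ("excellent",         "advanced_courses",   "should_consider")]

def resolve_strategies (problems : List String) (level : String) : List String :=
  let strategies : PySem.Set String :=
    problems.foldl (fun strategies prob =>
      pvEdges.foldl (fun strategies e =>
        if e.1 == prob && e.2.2 == "is_resolved_by" then PySem.Set.add strategies e.2.1
        else strategies) strategies) PySem.Set.empty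
  pvEdges.foldl (fun strategies e =>
    if e.1 == level && (e.2.2 == "requires" || e.2.2 == "should_consider" || e.2.2 == "should_practice")
    then PySem.Set.add strategies e.2.1 else strategies) strategies

-- ===== PORT B =====
-- module-level index build: (RESOLVERS, LEVEL_STRATEGIES)
def pvIndexes : PySem.Dict String (PySem.Set String) × PySem.Dict String (PySem.Set String) :=
  pvEdges.foldl (fun acc e =>
    if e.2.2 == "is_resolved_by" then
      (acc.1.modify e.1 PySem.Set.empty (fun s => PySem.Set.add s e.2.1), acc.2)
    else if e.2.2 == "requires" || e.2.2 == "should_consider" || e.2.2 == "should_practice" then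
      (acc.1, acc.2.modify e.1 PySem.Set.empty (fun s => PySem.Set.add s e.2.1))
    else acc)
    (PySem.Dict.empty, PySem.Dict.empty)

def resolve_strategies_alt (problems : List String) (level : String) : List String :=
  let strategies : PySem.Set String :=
    problems.foldl (fun strategies prob =>
      PySem.Set.union strategies (pvIndexes.1.getD prob PySem.Set.empty)) PySem.Set.empty
  PySem.Set.union strategies (pvIndexes.2.getD level PySem.Set.empty)

-- ===== PRECONDITION & SPEC =====
def Spec_resolve_strategies (problems : List String) (level : String) (out : List String) : Prop := out = resolve_strategies_alt problems level
instance (problems : List String) (level : String) (out : List String) : Decidable (Spec_resolve_strategies problems level out) := by unfold Spec_resolve_strategies; infer_instance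

-- ===== CLAIM (what is proved, stated in full; the proofs are below) =====
def Claim_equal_resolve_strategies : Prop := ∀ (problems : List String) (level : String), Dom_resolve_strategies problems level → Spec_resolve_strategies problems level (resolve_strategies problems level)

-- ===== LEMMAS AND PROOFS =====
lemma pv_inner_resolvers (s : PySem.Set String) (prob : String) :
    pvEdges.foldl (fun strategies e =>
      if e.1 == prob && e.2.2 == "is_resolved_by" then PySem.Set.add strategies e.2.1
      else strategies) s
      = PySem.Set.union s (pvIndexes.1.getD prob PySem.Set.empty) := by
  by_cases h1 : prob = "low_gpa"
  · subst h1; rfl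
  by_cases h2 : prob = "poor_attendance"
  · subst h2; rfl
  by_cases h3 : prob = "weak_subjects"
  · subst h3; rfl
  by_cases h4 : prob = "low_study_hours"
  · subst h4; rfl
  by_cases h5 : prob = "no_extracurricular"
  · subst h5; rfl
  have e1 : ¬ ("low_gpa" = prob) := Ne.symm h1
  have e2 : ¬ ("poor_attendance" = prob) := Ne.symm h2
  have e3 : ¬ ("weak_subjects" = prob) := Ne.symm h3
  have e4 : ¬ ("low_study_hours" = prob) := Ne.symm h4
  have e5 : ¬ ("no_extracurricular" = prob) := Ne.symm h5
  simp [pvEdges, pvIndexes, PySem.Dict.getD, PySem.Dict.get?, PySem.Dict.modify,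
        PySem.Dict.insert, PySem.Dict.contains, PySem.Dict.empty,
        PySem.Set.union, PySem.Set.update, e1, e2, e3, e4, e5]

lemma pv_level_strats (s : PySem.Set String) (level : String) :
    pvEdges.foldl (fun strategies e =>
      if e.1 == level && (e.2.2 == "requires" || e.2.2 == "should_consider" || e.2.2 == "should_practice")
      then PySem.Set.add strategies e.2.1 else strategies) s
      = PySem.Set.union s (pvIndexes.2.getD level PySem.Set.empty) := by
  by_cases h1 : level = "critical"
  · subst h1; rfl
  by_cases h2 : level = "below_average"
  · subst h2; rfl
  by_cases h3 : level = "good"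
  · subst h3; rfl
  by_cases h4 : level = "excellent"
  · subst h4; rfl
  have e1 : ¬ ("critical" = level) := Ne.symm h1
  have e2 : ¬ ("below_average" = level) := Ne.symm h2
  have e3 : ¬ ("good" = level) := Ne.symm h3
  have e4 : ¬ ("excellent" = level) := Ne.symm h4
  simp [pvEdges, pvIndexes, PySem.Dict.getD, PySem.Dict.get?, PySem.Dict.modify,
        PySem.Dict.insert, PySem.Dict.contains, PySem.Dict.empty,
        PySem.Set.union, PySem.Set.update, e1, e2, e3, e4]

-- ===== VERDICT (by name: the statement is the Claim_ definition above) =====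
theorem resolve_strategies_spec : Claim_equal_resolve_strategies := by
  intro problems level _
  unfold Spec_resolve_strategies resolve_strategies resolve_strategies_alt
  simp only [pv_inner_resolvers, pv_level_strats]
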